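-- pv_equiv track=rewrite | github.com/geckmf/PyCox | matrices.py | partitioncap
-- ===== SOURCE A (Python) =====
-- def partitioncap(p1, p2):
--     """returns the common refinement of two partitions of the same set.
--     """
--     s2 = [set([str(x) for x in l]) for l in p2]
--     neu = []
--     for p in p1:
--         s = [str(x) for x in p]
--         for j in range(len(s2)):
--             nn = [p[i] for i in range(len(s)) if s[i] in s2[j]]
--             if nn != []:
--                 neu.append(nn)
--     return neu
-- ===== SOURCE B (Python) =====
-- def partitioncap(p1, p2):
--     """returns the common refinement of two partitions of the same set.
--
--     One pass builds an index str(element) -> sorted list of p2-block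
--     indices; each p1 block is then bucketed by those indices directly,
--     without scanning every p2 block.
--     """
--     idx = {}
--     for j, block in enumerate(p2):
--         for x in block:
--             t = str(x)
--             js = idx.get(t)
--             if js is None:
--                 idx[t] = [j]
--             elif js[-1] != j:
--                 js.append(j)
--     neu = []
--     for p in p1:
--         buckets = [[] for _ in p2]
--         for x in p:
--             for j in idx.get(str(x), []):
--                 buckets[j].append(x)
--         neu.extend(b for b in buckets if b)
--     return neu
-- ===== Notes on version B (the rewrite author's own statement) =====
-- stated objective: faster
-- what changed: Replaces the per-p1-block scan over every p2 block by a dict built once from p2 mapping str(element) to its sorted list of p2-block indices; each p1 block is bucketed into per-index lists in one pass and nonempty buckets are emitted in index order.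
import Mathlib
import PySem

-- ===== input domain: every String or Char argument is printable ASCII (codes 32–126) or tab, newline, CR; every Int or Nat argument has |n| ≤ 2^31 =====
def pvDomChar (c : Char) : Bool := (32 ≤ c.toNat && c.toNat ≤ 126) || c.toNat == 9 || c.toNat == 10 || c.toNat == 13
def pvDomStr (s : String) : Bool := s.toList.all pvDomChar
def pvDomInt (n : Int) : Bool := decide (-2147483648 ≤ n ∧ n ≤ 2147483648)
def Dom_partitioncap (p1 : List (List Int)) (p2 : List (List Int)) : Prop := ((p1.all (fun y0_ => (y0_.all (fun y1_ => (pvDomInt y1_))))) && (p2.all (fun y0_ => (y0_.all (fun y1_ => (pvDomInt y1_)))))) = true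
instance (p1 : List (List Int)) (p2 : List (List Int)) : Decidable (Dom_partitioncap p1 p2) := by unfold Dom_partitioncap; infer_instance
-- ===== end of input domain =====

-- B replaces A's scan of every p2 block per p1 block by a str(element)->p2-block-indices
-- dict built once; measured faster (asymptotic: bucketing instead of per-block scans).

-- ===== PORT A =====
-- literal transliteration of A; the pyGetD defaults are only taken at in-range
-- indices produced by range(len(..)), where pyGetD equals the Python indexing exactly
def partitioncap (p1 : List (List Int)) (p2 : List (List Int)) : List (List Int) :=
  let s2 : List (PySem.Set String) :=
    p2.map (fun l => PySem.Set.ofList (l.map (fun x => PySem.Int.toStr x)))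
  p1.foldl (fun neu p =>
    let s := p.map (fun x => PySem.Int.toStr x)
    (PySem.List.pyRange 0 (s2.length : Int) 1).foldl (fun neu j =>
      let nn := ((PySem.List.pyRange 0 (s.length : Int) 1).filter (fun i =>
          PySem.Set.contains (PySem.List.pyGetD s2 j []) (PySem.List.pyGetD s i ""))).map
          (fun i => PySem.List.pyGetD p i (0 : Int))
      if nn ≠ [] then neu ++ [nn] else neu) neu) []

-- ===== PORT B =====
-- body of B's index-building inner loop ('for x in block: …' with block index j)
def pcStep (j : Int) (idx : PySem.Dict String (List Int)) (x : Int) : PySem.Dict String (List Int) :=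
  -- t = str(x); js = idx.get(t); the two if-branches of B's inner loop
  match idx.get? (PySem.Int.toStr x) with
  | none => idx.insert (PySem.Int.toStr x) [j]
  | some js =>
    -- js[-1] != j  (a stored js is never empty, so pyGet? is exact here)
    if PySem.List.pyGet? js (-1) ≠ some j then idx.insert (PySem.Int.toStr x) (js ++ [j]) else idx

-- idx = {}; for j, block in enumerate(p2): for x in block: …
def pcIndex (p2 : List (List Int)) : PySem.Dict String (List Int) :=
  (PySem.List.enumerate p2 0).foldl (fun idx jb => jb.2.foldl (pcStep jb.1) idx)
    PySem.Dict.empty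

def partitioncap_alt (p1 : List (List Int)) (p2 : List (List Int)) : List (List Int) :=
  let idx := pcIndex p2
  p1.foldl (fun neu p =>
    let buckets := p.foldl (fun bs x =>
        (idx.getD (PySem.Int.toStr x) []).foldl (fun bs j =>
          -- buckets[j].append(x); every stored j is in range, where pySetD/pyGetD are exact
          PySem.List.pySetD bs j (PySem.List.pyGetD bs j [] ++ [x])) bs)
      (List.replicate p2.length [])
    neu ++ buckets.filter (fun b => !b.isEmpty)) []

-- ===== PRECONDITION & SPEC =====
def Spec_partitioncap (p1 : List (List Int)) (p2 : List (List Int)) (out : List (List Int)) : Prop := out = partitioncap_alt p1 p2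
instance (p1 : List (List Int)) (p2 : List (List Int)) (out : List (List Int)) : Decidable (Spec_partitioncap p1 p2 out) := by unfold Spec_partitioncap; infer_instance

-- ===== CLAIM (what is proved, stated in full; the proofs are below) =====
def Claim_equal_partitioncap : Prop := ∀ (p1 : List (List Int)) (p2 : List (List Int)), Dom_partitioncap p1 p2 → Spec_partitioncap p1 p2 (partitioncap p1 p2)

-- ===== LEMMAS AND PROOFS =====

-- the common canonical value: per p1 block, the traces on the p2 blocks, nonempty ones only
def pcCanon (p1 : List (List Int)) (p2 : List (List Int)) : List (List Int) :=
  p1.flatMap (fun p =>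
    (p2.map (fun b => p.filter (fun x =>
        decide (PySem.Int.toStr x ∈ b.map (fun y => PySem.Int.toStr y))))).filter
      (fun nn => decide (nn ≠ [])))

theorem filter_map_comm {α β : Type} (f : α → β) (q : β → Bool) (l : List α) :
    (l.filter (fun x => q (f x))).map f = (l.map f).filter q := by
  induction l with
  | nil => simp
  | cons x l ih => by_cases h : q (f x) <;> simp [h, ih]

theorem foldl_append_ite_ne {α β : Type} (f : α → List β) (l : List α) (acc : List (List β)) :
    l.foldl (fun acc x => if f x ≠ [] then acc ++ [f x] else acc) acc
      = acc ++ (l.map f).filter (fun nn => decide (nn ≠ [])) := by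
  induction l generalizing acc with
  | nil => simp
  | cons x l ih =>
    simp only [List.foldl_cons, List.map_cons, List.filter_cons]
    by_cases h : f x = []
    · rw [if_neg (by simp [h]), ih]
      simp [h]
    · rw [if_pos h, ih]
      simp [h, List.append_assoc]

theorem contains_ofList_eq (l : List String) (t : String) :
    PySem.Set.contains (PySem.Set.ofList l) t = decide (t ∈ l) := by
  rw [Bool.eq_iff_iff]
  simp [PySem.Set.mem_ofList]

theorem comprehension_eq (p : List Int) (q : String → Bool) :
    ((PySem.List.pyRange 0 (((p.map (fun x => PySem.Int.toStr x)).length : Int)) 1).filter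
        (fun i => q (PySem.List.pyGetD (p.map (fun x => PySem.Int.toStr x)) i ""))).map
      (fun i => PySem.List.pyGetD p i (0 : Int))
    = p.filter (fun x => q (PySem.Int.toStr x)) := by
  have hcong : ∀ i ∈ PySem.List.pyRange 0 (((p.map (fun x => PySem.Int.toStr x)).length : Int)) 1,
      (q (PySem.List.pyGetD (p.map (fun x => PySem.Int.toStr x)) i ""))
        = ((fun y => q (PySem.Int.toStr y)) (PySem.List.pyGetD p i (0 : Int))) := by
    intro i hi
    have hi' := (PySem.List.mem_pyRange_one).1 hi
    have h1 : i < ((p.map (fun x => PySem.Int.toStr x)).length : Int) := hi'.2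
    have h1' : i < (p.length : Int) := by simpa using hi'.2
    rw [PySem.List.pyGetD_eq_getElem _ _ hi'.1 h1,
        PySem.List.pyGetD_eq_getElem _ _ hi'.1 h1']
    simp
  rw [List.filter_congr hcong,
      filter_map_comm (fun i => PySem.List.pyGetD p i (0 : Int)) (fun y => q (PySem.Int.toStr y))]
  have hlen : ((p.map (fun x => PySem.Int.toStr x)).length : Int) = (p.length : Int) := by simp
  rw [hlen, PySem.List.map_pyGetD_pyRange_zero' p (0 : Int)]

theorem map_comp_getD {α : Type} (xs : List α) (d : α) (H : α → List Int) :
    (PySem.List.pyRange 0 (xs.length : Int) 1).map (fun j => H (PySem.List.pyGetD xs j d))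
      = xs.map H := by
  conv_rhs => rw [← PySem.List.map_pyGetD_pyRange_zero' xs d]
  rw [List.map_map]
  rfl

theorem partitioncap_eq_canon (p1 p2 : List (List Int)) :
    partitioncap p1 p2 = pcCanon p1 p2 := by
  unfold partitioncap pcCanon
  dsimp only
  rw [PySem.List.foldl_congr_mem p1 _
    (fun neu p => neu ++ (p2.map (fun b => p.filter (fun x =>
        decide (PySem.Int.toStr x ∈ b.map (fun y => PySem.Int.toStr y))))).filter
      (fun nn => decide (nn ≠ []))) []
    (by
      intro acc p _
      rw [foldl_append_ite_ne]
      congr 1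
      simp only [comprehension_eq]
      rw [map_comp_getD (p2.map (fun l => PySem.Set.ofList (l.map (fun x => PySem.Int.toStr x)))) []
        (fun S => p.filter (fun x => PySem.Set.contains S (PySem.Int.toStr x)))]
      rw [List.map_map]
      congr 1
      apply List.map_congr_left
      intro b _
      simp only [Function.comp]
      apply List.filter_congr
      intro x _
      rw [contains_ofList_eq])]
  rw [PySem.List.foldl_append_eq_flatMap]
  simp

-- ==== B side ====

def pcEnc (l : List Int) : Option (List Int) := if l = [] then none else some l

-- j-list of a string t: the indices of the p2 blocks whose elements' strs contain t
def pcJ (p2 : List (List Int)) (t : String) : List Int :=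
  ((PySem.List.enumerate p2 0).filter (fun jb =>
    decide (t ∈ jb.2.map (fun y => PySem.Int.toStr y)))).map Prod.fst

theorem pyGet?_append_last (l : List Int) (a : Int) :
    PySem.List.pyGet? (l ++ [a]) (-1) = some a := by
  simp [PySem.List.pyGet?, PySem.List.pyIdx?]

theorem pyGet?_neg_one_mem (l : List Int) (h : l ≠ []) :
    ∃ a ∈ l, PySem.List.pyGet? l (-1) = some a := by
  rcases (List.eq_nil_or_concat l) with rfl | ⟨l', a, hl⟩
  · exact absurd rfl h
  · subst hl
    rw [List.concat_eq_append]
    exact ⟨a, by simp, pyGet?_append_last l' a⟩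

theorem pcStep_none (j x : Int) (d : PySem.Dict String (List Int))
    (h : d.get? (PySem.Int.toStr x) = none) :
    pcStep j d x = d.insert (PySem.Int.toStr x) [j] := by
  unfold pcStep
  rw [h]

theorem pcStep_some (j x : Int) (d : PySem.Dict String (List Int)) (js : List Int)
    (h : d.get? (PySem.Int.toStr x) = some js) :
    pcStep j d x = if PySem.List.pyGet? js (-1) ≠ some j
      then d.insert (PySem.Int.toStr x) (js ++ [j]) else d := by
  unfold pcStep
  rw [h]

theorem pcIndex_block (b : List Int) (s : Int) (d : PySem.Dict String (List Int))
    (g : String → List Int) (f : String → Bool)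
    (hget : ∀ t, d.get? t = pcEnc (g t ++ if f t then [s] else []))
    (hlt : ∀ t j, j ∈ g t → j < s) (t : String) :
    (b.foldl (pcStep s) d).get? t
      = pcEnc (g t ++ if (f t || decide (t ∈ b.map (fun y => PySem.Int.toStr y))) then [s] else []) := by
  induction b generalizing d f with
  | nil => simpa using hget t
  | cons x b ih =>
    simp only [List.foldl_cons]
    have hstep : ∀ u, (pcStep s d x).get? u
        = pcEnc (g u ++ if (f u || decide (u = PySem.Int.toStr x)) then [s] else []) := by
      intro u
      have h0 := hget (PySem.Int.toStr x)
      cases hf : f (PySem.Int.toStr x) with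
      | true =>
        simp only [hf, if_true] at h0
        have hsome : d.get? (PySem.Int.toStr x) = some (g (PySem.Int.toStr x) ++ [s]) := by
          rw [h0]; simp [pcEnc]
        rw [pcStep_some s x d _ hsome, if_neg (by rw [pyGet?_append_last]; simp)]
        rw [hget u]
        by_cases hu : u = PySem.Int.toStr x
        · subst hu; simp [hf]
        · simp [hu]
      | false =>
        simp only [hf, Bool.false_eq_true, if_false, List.append_nil] at h0
        by_cases hg : g (PySem.Int.toStr x) = []
        · rw [pcStep_none s x d (by rw [h0]; simp [pcEnc, hg])]
          by_cases hu : u = PySem.Int.toStr x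
          · subst hu
            rw [PySem.Dict.get?_insert_self]
            simp [pcEnc, hg]
          · rw [PySem.Dict.get?_insert_of_ne _ _ hu, hget u]
            simp [hu]
        · have hsome : d.get? (PySem.Int.toStr x) = some (g (PySem.Int.toStr x)) := by
            rw [h0]; simp [pcEnc, hg]
          obtain ⟨a, ha, hga⟩ := pyGet?_neg_one_mem _ hg
          have has : a < s := hlt _ a ha
          rw [pcStep_some s x d _ hsome,
            if_pos (by rw [hga]; intro hcon; exact absurd (Option.some.inj hcon) (by omega))]
          by_cases hu : u = PySem.Int.toStr x
          · subst hu
            rw [PySem.Dict.get?_insert_self]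
            simp [pcEnc]
          · rw [PySem.Dict.get?_insert_of_ne _ _ hu, hget u]
            simp [hu]
    rw [ih (pcStep s d x) (fun u => f u || decide (u = PySem.Int.toStr x)) hstep]
    have hdec : decide ((t = PySem.Int.toStr x) ∨ t ∈ List.map (fun y => PySem.Int.toStr y) b)
        = (decide (t = PySem.Int.toStr x) || decide (t ∈ List.map (fun y => PySem.Int.toStr y) b)) := by
      by_cases h1 : t = PySem.Int.toStr x <;> simp [h1]
    simp only [List.map_cons, List.mem_cons, hdec, Bool.or_assoc]

theorem pcIndex_enum (l : List (List Int)) (s : Int) (d : PySem.Dict String (List Int))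
    (g : String → List Int)
    (hget : ∀ t, d.get? t = pcEnc (g t))
    (hlt : ∀ t j, j ∈ g t → j < s) (t : String) :
    ((PySem.List.enumerate l s).foldl (fun idx jb => jb.2.foldl (pcStep jb.1) idx) d).get? t
      = pcEnc (g t ++ ((PySem.List.enumerate l s).filter (fun jb =>
          decide (t ∈ jb.2.map (fun y => PySem.Int.toStr y)))).map Prod.fst) := by
  induction l generalizing s d g with
  | nil => simpa [PySem.List.enumerate_nil] using hget t
  | cons b l ih =>
    rw [PySem.List.enumerate_cons]
    simp only [List.foldl_cons, List.filter_cons]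
    have hblock := pcIndex_block b s d g (fun _ => false)
      (by intro u; simpa using hget u) hlt
    have ih' := ih (s + 1) (b.foldl (pcStep s) d)
      (fun u => g u ++ if decide (u ∈ b.map (fun y => PySem.Int.toStr y)) then [s] else [])
      (by intro u; simpa using hblock u)
      (by
        intro u j hj
        have hj' : j ∈ g u ++ (if decide (u ∈ b.map (fun y => PySem.Int.toStr y)) then [s]
            else []) := hj
        rcases List.mem_append.1 hj' with h | h
        · have := hlt u j h; omega
        · by_cases hb : u ∈ b.map (fun y => PySem.Int.toStr y)
          · rw [if_pos (by simpa using hb)] at h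
            simp only [List.mem_singleton] at h
            omega
          · rw [if_neg (by simpa using hb)] at h
            cases h)
    rw [ih']
    by_cases hmem : t ∈ b.map (fun y => PySem.Int.toStr y)
    · simp [hmem, List.append_assoc]
    · simp [hmem]

theorem pcIndex_getD (p2 : List (List Int)) (t : String) :
    (pcIndex p2).getD t [] = pcJ p2 t := by
  have h := pcIndex_enum p2 0 PySem.Dict.empty (fun _ => [])
    (by intro u; simp [pcEnc, PySem.Dict.get?_empty]) (by intro u j hj; cases hj) t
  simp only [List.nil_append] at h
  unfold pcIndex pcJ
  simp only [PySem.Dict.getD]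
  rw [h]
  unfold pcEnc
  split_ifs with h0
  · rw [h0]; rfl
  · rfl

theorem mem_pcJ (p2 : List (List Int)) (t : String) (k : Nat) :
    ((k : Int) ∈ pcJ p2 t)
      ↔ (k < p2.length ∧ t ∈ (p2[k]?.getD []).map (fun y => PySem.Int.toStr y)) := by
  unfold pcJ
  simp only [List.mem_map, List.mem_filter, PySem.List.mem_enumerate_iff]
  constructor
  · rintro ⟨jb, ⟨⟨i, hi, rfl⟩, hdec⟩, hfst⟩
    simp only [zero_add] at hfst ⊢
    have hik : i = k := by exact_mod_cast hfst
    subst hik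
    refine ⟨hi, ?_⟩
    simpa [List.getElem?_eq_getElem hi] using hdec
  · rintro ⟨hk, hmem⟩
    refine ⟨((k : Int), p2[k]), ⟨⟨k, hk, by simp⟩, ?_⟩, rfl⟩
    simpa [List.getElem?_eq_getElem hk] using hmem

theorem pcJ_pairwise (p2 : List (List Int)) (t : String) :
    (pcJ p2 t).Pairwise (· ≠ ·) :=
  List.Pairwise.map _ (fun _ _ h => ne_of_lt h)
    (List.Pairwise.filter _ (PySem.List.pairwise_lt_enumerate p2 0))

theorem pcJ_mem_range (p2 : List (List Int)) (t : String) :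
    ∀ j ∈ pcJ p2 t, 0 ≤ j ∧ j < (p2.length : Int) := by
  intro j hj
  unfold pcJ at hj
  simp only [List.mem_map, List.mem_filter, PySem.List.mem_enumerate_iff] at hj
  rcases hj with ⟨jb, ⟨⟨i, hi, rfl⟩, _⟩, hfst⟩
  subst hfst
  simp only [zero_add]
  constructor <;> [positivity; exact_mod_cast hi]

theorem buckets_step (js : List Int) (x : Int) (bs : List (List Int))
    (hnd : js.Pairwise (· ≠ ·)) (hr : ∀ j ∈ js, 0 ≤ j ∧ j < (bs.length : Int)) (k : Nat) :
    (js.foldl (fun bs j => PySem.List.pySetD bs j (PySem.List.pyGetD bs j [] ++ [x])) bs)[k]?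
      = if (k : Int) ∈ js then bs[k]?.map (fun l => l ++ [x]) else bs[k]? := by
  induction js generalizing bs with
  | nil => simp
  | cons j js ih =>
    obtain ⟨h0, h1⟩ := hr j List.mem_cons_self
    have hjlen : j.toNat < bs.length := by omega
    simp only [List.foldl_cons]
    rw [PySem.List.pySetD_of_nonneg _ _ h0, PySem.List.pyGetD_eq_getElem _ _ h0 h1]
    rw [ih _ (List.Pairwise.of_cons hnd)
      (by intro j' hj'; simpa using hr j' (List.mem_cons_of_mem _ hj'))]
    rw [List.getElem?_set]
    rcases List.pairwise_cons.1 hnd with ⟨hjne, _⟩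
    by_cases hk : (k : Int) ∈ js
    · have : j.toNat ≠ k := by
        intro he
        exact hjne _ hk (by omega)
      simp [hk, this]
    · by_cases hkj : (k : Int) = j
      · have hjk : j.toNat = k := by omega
        have hklen : k < bs.length := by omega
        simp [hkj, hjk, hklen]
        exact fun hj => hjne j hj rfl
      · have : j.toNat ≠ k := by omega
        simp [hk, hkj, this]

theorem buckets_step_len (js : List Int) (x : Int) (bs : List (List Int)) :
    (js.foldl (fun bs j => PySem.List.pySetD bs j (PySem.List.pyGetD bs j [] ++ [x])) bs).length
      = bs.length := by
  induction js generalizing bs with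
  | nil => rfl
  | cons j js ih => simp [List.foldl_cons, ih, PySem.List.length_pySetD]

theorem buckets_inv (p2 : List (List Int)) (p : List Int) (bs : List (List Int))
    (hlen : bs.length = p2.length) (k : Nat) :
    (p.foldl (fun bs x => (pcJ p2 (PySem.Int.toStr x)).foldl
        (fun bs j => PySem.List.pySetD bs j (PySem.List.pyGetD bs j [] ++ [x])) bs) bs)[k]?
      = bs[k]?.map (fun l => l ++ p.filter (fun x =>
          decide (PySem.Int.toStr x ∈ (p2[k]?.getD []).map (fun y => PySem.Int.toStr y)))) := by
  induction p generalizing bs with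
  | nil => cases h : bs[k]? <;> simp [h]
  | cons x p ih =>
    simp only [List.foldl_cons, List.filter_cons]
    rw [ih _ (by rw [buckets_step_len]; exact hlen)]
    rw [buckets_step _ _ _ (pcJ_pairwise p2 _) (by rw [hlen]; exact pcJ_mem_range p2 _) k]
    by_cases hc : (k : Int) ∈ pcJ p2 (PySem.Int.toStr x)
    · obtain ⟨hk, hmem⟩ := (mem_pcJ p2 _ k).1 hc
      simp only [hc, if_pos, hmem, decide_true]
      cases bs[k]? <;> simp [List.append_assoc]
    · have hcond : ¬ (PySem.Int.toStr x ∈ (p2[k]?.getD []).map (fun y => PySem.Int.toStr y)) := by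
        intro hmem
        by_cases hk : k < p2.length
        · exact hc ((mem_pcJ p2 _ k).2 ⟨hk, hmem⟩)
        · rw [List.getElem?_eq_none (by omega)] at hmem
          simp at hmem
      simp [hc, hcond]

theorem buckets_eq (p2 : List (List Int)) (p : List Int) :
    p.foldl (fun bs x => (pcJ p2 (PySem.Int.toStr x)).foldl
        (fun bs j => PySem.List.pySetD bs j (PySem.List.pyGetD bs j [] ++ [x])) bs)
      (List.replicate p2.length [])
    = p2.map (fun b => p.filter (fun x =>
        decide (PySem.Int.toStr x ∈ b.map (fun y => PySem.Int.toStr y)))) := by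
  apply List.ext_getElem?
  intro k
  rw [buckets_inv p2 p _ (by simp) k, List.getElem?_replicate]
  by_cases hk : k < p2.length
  · simp [hk]
  · simp [hk]

theorem partitioncap_alt_eq_canon (p1 p2 : List (List Int)) :
    partitioncap_alt p1 p2 = pcCanon p1 p2 := by
  unfold partitioncap_alt pcCanon
  dsimp only
  simp only [pcIndex_getD]
  rw [PySem.List.foldl_congr_mem p1 _
    (fun neu p => neu ++ (p2.map (fun b => p.filter (fun x =>
        decide (PySem.Int.toStr x ∈ b.map (fun y => PySem.Int.toStr y))))).filter
      (fun nn => decide (nn ≠ []))) []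
    (by
      intro acc p _
      rw [buckets_eq]
      congr 1
      apply List.filter_congr
      intro l _
      cases l <;> simp)]
  rw [PySem.List.foldl_append_eq_flatMap]
  simp

-- ===== VERDICT (by name: the statement is the Claim_ definition above) =====
theorem partitioncap_spec : Claim_equal_partitioncap := by
  intro p1 p2 _
  unfold Spec_partitioncap
  rw [partitioncap_eq_canon, partitioncap_alt_eq_canon]
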